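-- pv_equiv track=rewrite | github.com/lerenah/python | lexicographical_order.py | solve
-- ===== SOURCE A (Python) =====
-- def solve(arr):
--     #
--     # Write your code here.
--     #
--     output = []
--     arr_dict = {}
--     for el in arr:
--         idx = el.index(' ')
--         key = el[:idx]
--         val = el[idx + 1:]
--         arr_dict.setdefault(key, []).append(val)
--
--     for key, val in arr_dict.items():
--         output.append(f'{key}:{len(val)},{max(val)}')
--
--     return output
-- ===== SOURCE B (Python) =====
-- def solve(arr):
--     agg = {}
--     for el in arr:
--         i = el.index(' ')
--         key = el[:i]
--         val = el[i + 1:]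
--         if key in agg:
--             cnt, mx = agg[key]
--             agg[key] = (cnt + 1, val if val > mx else mx)
--         else:
--             agg[key] = (1, val)
--     return [f'{k}:{c},{m}' for k, (c, m) in agg.items()]
-- ===== Notes on version B (the rewrite author's own statement) =====
-- stated objective: simpler
-- what changed: B keeps one dict of running (count, max) aggregates updated in a single pass instead of A's dict of value lists followed by a second len/max aggregation pass over every stored list.
import Mathlib
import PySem

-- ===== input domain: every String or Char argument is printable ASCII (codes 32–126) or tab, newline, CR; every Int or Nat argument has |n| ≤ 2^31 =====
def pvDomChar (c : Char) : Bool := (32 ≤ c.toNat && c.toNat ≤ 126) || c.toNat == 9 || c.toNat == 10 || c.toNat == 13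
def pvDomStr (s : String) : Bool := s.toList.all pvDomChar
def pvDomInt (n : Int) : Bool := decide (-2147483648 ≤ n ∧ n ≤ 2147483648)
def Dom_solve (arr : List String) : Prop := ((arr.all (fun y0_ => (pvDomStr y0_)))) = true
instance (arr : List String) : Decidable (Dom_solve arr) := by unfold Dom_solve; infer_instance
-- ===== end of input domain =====

-- B replaces A's dict of value lists plus a second len/max pass by one dict of running
-- (count, max) aggregates updated in a single pass (objective: simpler).

-- ===== PORT A =====
-- loop body: idx = el.index(' '); key = el[:idx]; val = el[idx+1:];
-- arr_dict.setdefault(key, []).append(val)   (el.index ported with Str.find; Pre_solve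
-- guarantees the space is present, exactly where .index returns instead of raising)
def solveStepA (d : PySem.Dict String (List String)) (el : String) :
    PySem.Dict String (List String) :=
  let idx := PySem.Str.find el " "
  let key := PySem.Str.slice el none (some idx)
  let val := PySem.Str.slice el (some (idx + 1)) none
  let d1 := d.setdefault key []                       -- arr_dict.setdefault(key, [])
  d1.insert key (d1.getD key [] ++ [val])             -- .append(val) on the stored list

def solve (arr : List String) : List String :=
  let arr_dict := arr.foldl solveStepA PySem.Dict.empty
  arr_dict.items.foldl
    (fun output kv =>
      output ++ [kv.1 ++ ":" ++ PySem.Int.toStr (kv.2.length : Int) ++ "," ++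
        (PySem.List.max? kv.2 (fun y => y)).getD ""]) []

-- ===== PORT B =====
-- loop body: i = el.index(' '); key = el[:i]; val = el[i+1:];
-- if key in agg: (cnt, mx) = agg[key]; agg[key] = (cnt+1, val if val > mx else mx)
-- else: agg[key] = (1, val)
def solveStepB (d : PySem.Dict String (Int × String)) (el : String) :
    PySem.Dict String (Int × String) :=
  let i := PySem.Str.find el " "
  let key := PySem.Str.slice el none (some i)
  let val := PySem.Str.slice el (some (i + 1)) none
  d.insert key (match d.get? key with
    | some cm => (cm.1 + 1, if cm.2 < val then val else cm.2)
    | none => ((1 : Int), val))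

def solve_alt (arr : List String) : List String :=
  (arr.foldl solveStepB PySem.Dict.empty).items.map
    (fun kv => kv.1 ++ ":" ++ PySem.Int.toStr kv.2.1 ++ "," ++ kv.2.2)

-- ===== PRECONDITION & SPEC =====
-- Pre_solve: every element contains a space — exactly where el.index(' ') returns
-- (Python A raises ValueError otherwise, as does B).
def Pre_solve (arr : List String) : Prop :=
  (arr.all (fun el => PySem.Str.isIn " " el)) = true
instance (arr : List String) : Decidable (Pre_solve arr) := by unfold Pre_solve; infer_instance

def pvWitness_solve : List String := ["a 1", "a 2", "b x"]

def Spec_solve (arr : List String) (out : List String) : Prop := out = solve_alt arr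
instance (arr : List String) (out : List String) : Decidable (Spec_solve arr out) := by
  unfold Spec_solve; infer_instance

-- ===== CLAIM (what is proved, stated in full; the proofs are below) =====
def Claim_equal_solve : Prop :=
  ∀ (arr : List String), Dom_solve arr → Pre_solve arr → Spec_solve arr (solve arr)

-- ===== LEMMAS AND PROOFS =====

-- B's aggregate of a stored value list: its length and its Python max.
def aggOf (s : List String) : Int × String :=
  ((s.length : Int), (PySem.List.max? s (fun y => y)).getD "")

theorem aggOf_single (v : String) : aggOf [v] = (1, v) := by
  simp [aggOf, PySem.List.max?_id_cons]

theorem aggOf_append (s : List String) (hs : s ≠ []) (v : String) :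
    aggOf (s ++ [v]) = ((aggOf s).1 + 1, if (aggOf s).2 < v then v else (aggOf s).2) := by
  obtain ⟨x, t, rfl⟩ := List.exists_cons_of_ne_nil hs
  simp only [aggOf, List.cons_append, PySem.List.max?_id_cons, List.foldl_append,
    List.foldl_cons, List.foldl_nil, Option.getD_some, List.length_cons, List.length_append,
    List.length_nil]
  refine Prod.ext ?_ ?_
  · push_cast; ring
  · exact max_def_lt _ _

-- one A-step, lookup-wise
theorem stepA_get? (d : PySem.Dict String (List String)) (el k : String) :
    (solveStepA d el).get? k =
      (if k = PySem.Str.slice el none (some (PySem.Str.find el " ")) then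
        some (d.getD (PySem.Str.slice el none (some (PySem.Str.find el " "))) [] ++
          [PySem.Str.slice el (some (PySem.Str.find el " " + 1)) none])
      else d.get? k) := by
  simp only [solveStepA]
  rw [PySem.Dict.get?_insert]
  split_ifs with h
  · rw [PySem.Dict.getD_setdefault_self]
  · rw [PySem.Dict.get?_setdefault_of_ne _ _ h]

theorem stepA_keys (d : PySem.Dict String (List String)) (el : String) :
    (solveStepA d el).keys =
      (if d.contains (PySem.Str.slice el none (some (PySem.Str.find el " "))) = true
        then d.keys
        else d.keys ++ [PySem.Str.slice el none (some (PySem.Str.find el " "))]) := by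
  simp only [solveStepA]
  rw [PySem.Dict.keys_insert_of_contains _ _
    (by rw [PySem.Dict.contains_setdefault]; simp), PySem.Dict.keys_setdefault]

theorem stepB_get? (d : PySem.Dict String (Int × String)) (el k : String) :
    (solveStepB d el).get? k =
      (if k = PySem.Str.slice el none (some (PySem.Str.find el " ")) then
        some (match d.get? (PySem.Str.slice el none (some (PySem.Str.find el " "))) with
          | some cm => (cm.1 + 1,
              if cm.2 < PySem.Str.slice el (some (PySem.Str.find el " " + 1)) none
              then PySem.Str.slice el (some (PySem.Str.find el " " + 1)) none else cm.2)
          | none => ((1 : Int), PySem.Str.slice el (some (PySem.Str.find el " " + 1)) none))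
      else d.get? k) := by
  simp only [solveStepB]
  rw [PySem.Dict.get?_insert]

theorem stepB_keys (d : PySem.Dict String (Int × String)) (el : String) :
    (solveStepB d el).keys =
      (if d.contains (PySem.Str.slice el none (some (PySem.Str.find el " "))) = true
        then d.keys
        else d.keys ++ [PySem.Str.slice el none (some (PySem.Str.find el " "))]) := by
  simp only [solveStepB]
  rcases h : d.contains (PySem.Str.slice el none (some (PySem.Str.find el " "))) with _ | _
  · rw [PySem.Dict.keys_insert_of_not_contains _ _ h]; simp
  · rw [PySem.Dict.keys_insert_of_contains _ _ h]; simp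

-- simulation: B's dict is A's dict with every value list replaced by its aggregate
theorem sim (l : List String) :
    ∀ (dA : PySem.Dict String (List String)) (dB : PySem.Dict String (Int × String)),
    dB.keys = dA.keys → dA.keys.Nodup →
    (∀ k, dB.get? k = (dA.get? k).map aggOf) →
    (∀ k s, dA.get? k = some s → s ≠ []) →
    (l.foldl solveStepB dB).keys = (l.foldl solveStepA dA).keys ∧
    (l.foldl solveStepA dA).keys.Nodup ∧
    (∀ k, (l.foldl solveStepB dB).get? k = ((l.foldl solveStepA dA).get? k).map aggOf) ∧
    (∀ k s, (l.foldl solveStepA dA).get? k = some s → s ≠ []) := by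
  induction l with
  | nil => intro dA dB hk hnd hg hne; exact ⟨hk, hnd, hg, hne⟩
  | cons el t ih =>
    intro dA dB hk hnd hg hne
    simp only [List.foldl_cons]
    have hcont : dB.contains (PySem.Str.slice el none (some (PySem.Str.find el " "))) =
        dA.contains (PySem.Str.slice el none (some (PySem.Str.find el " "))) := by
      rw [PySem.Dict.contains_eq_decide_mem_keys, PySem.Dict.contains_eq_decide_mem_keys, hk]
    refine ih _ _ ?_ ?_ ?_ ?_
    · rw [stepA_keys, stepB_keys, hk, hcont]
    · rw [stepA_keys]
      split_ifs with h
      · exact hnd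
      · have hmem : PySem.Str.slice el none (some (PySem.Str.find el " ")) ∉ dA.keys := by
          rw [PySem.Dict.contains_eq_decide_mem_keys] at h; simpa using h
        rw [List.nodup_append]
        exact ⟨hnd, List.nodup_singleton _,
          by intro a ha b hb; rw [List.mem_singleton] at hb; subst hb
             exact fun e => hmem (e ▸ ha)⟩
    · intro k
      rw [stepA_get?, stepB_get?]
      by_cases hkk : k = PySem.Str.slice el none (some (PySem.Str.find el " "))
      · simp only [if_pos hkk, Option.map_some]
        rw [PySem.Dict.getD_eq_get?_getD]
        rcases h : dA.get? (PySem.Str.slice el none (some (PySem.Str.find el " "))) with _ | s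
        · rw [hg _, h]
          simp only [Option.map_none, Option.getD_none, List.nil_append]
          rw [aggOf_single]
        · have hs := hne _ s h
          rw [hg _, h]
          simp only [Option.map_some, Option.getD_some]
          rw [aggOf_append s hs]
      · simp only [if_neg hkk]; exact hg k
    · intro k s
      rw [stepA_get?]
      by_cases hkk : k = PySem.Str.slice el none (some (PySem.Str.find el " "))
      · simp only [if_pos hkk]
        intro h
        cases h
        simp
      · simp only [if_neg hkk]; exact hne k s

-- ===== VERDICT (by name: the statement is the Claim_ definition above) =====
theorem solve_spec : Claim_equal_solve := by
  intro arr _ _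
  unfold Spec_solve
  simp only [solve, solve_alt]
  obtain ⟨hk, hnd, hg, -⟩ :=
    sim arr PySem.Dict.empty PySem.Dict.empty (by rfl) (by constructor)
      (by intro k; rw [PySem.Dict.get?_empty, PySem.Dict.get?_empty]; rfl)
      (by intro k s h; rw [PySem.Dict.get?_empty] at h; cases h)
  rw [PySem.List.foldl_append_singleton_eq_map, List.nil_append,
    PySem.Dict.items_eq_map_keys _ hnd [],
    PySem.Dict.items_eq_map_keys _ (by rw [hk]; exact hnd) ((0 : Int), ""), hk,
    List.map_map, List.map_map]
  refine List.map_congr_left ?_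
  intro k _
  simp only [Function.comp_apply]
  rw [PySem.Dict.getD_eq_get?_getD, PySem.Dict.getD_eq_get?_getD, hg k]
  rcases h : (arr.foldl solveStepA PySem.Dict.empty).get? k with _ | s
  · simp only [Option.map_none, Option.getD_none]
    rfl
  · simp only [Option.map_some, Option.getD_some]
    rfl
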